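-- pv_equiv track=rewrite | github.com/mitchellnel/technical-interview-prep | gtci/17-modified-binary-search/python3/3-next-letter.py | searchNextLetter
-- ===== SOURCE A (Python) =====
-- def searchNextLetter(letters, key):
--     left = 0
--     right = len(letters) - 1
--     ceiling = 0
--
--     while left <= right:
--         mid = (left + right) // 2
--
--         if letters[mid] == key:
--             return letters[mid + 1] if mid + 1 < len(letters) else letters[0]
--         elif letters[mid] < key:
--             left = mid + 1
--         elif letters[mid] > key:
--             ceiling = mid
--             right = mid - 1
--
--     return letters[ceiling]
-- ===== SOURCE B (Python) =====
-- def searchNextLetter(letters, key):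
--     n = len(letters)
--
--     def locate(lo, hi):
--         # Pure index-level search: (True, i) if the probe letters[i] equals key,
--         # (False, lo) when the window is exhausted (lo is the ceiling position).
--         if lo > hi:
--             return (False, lo)
--         mid = lo + (hi - lo) // 2
--         if letters[mid] < key:
--             return locate(mid + 1, hi)
--         if letters[mid] > key:
--             return locate(lo, mid - 1)
--         return (True, mid)
--
--     hit, idx = locate(0, n - 1)
--     return letters[(idx + 1) % n] if hit else letters[idx % n]
-- ===== Notes on version B (the rewrite author's own statement) =====
-- stated objective: alternative
-- what changed: Splits the work into a pure recursive index-level search returning a (hit, index) tag (overflow-safe midpoint lo+(hi-lo)//2, less-than/greater-than branch order, no extra state) and a separate final step mapping that tag to the answer with modular index arithmetic, replacing A's single imperative loop that mutates left/right/ceiling and returns strings from inside the loop with two wrap-around special cases.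
import Mathlib
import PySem

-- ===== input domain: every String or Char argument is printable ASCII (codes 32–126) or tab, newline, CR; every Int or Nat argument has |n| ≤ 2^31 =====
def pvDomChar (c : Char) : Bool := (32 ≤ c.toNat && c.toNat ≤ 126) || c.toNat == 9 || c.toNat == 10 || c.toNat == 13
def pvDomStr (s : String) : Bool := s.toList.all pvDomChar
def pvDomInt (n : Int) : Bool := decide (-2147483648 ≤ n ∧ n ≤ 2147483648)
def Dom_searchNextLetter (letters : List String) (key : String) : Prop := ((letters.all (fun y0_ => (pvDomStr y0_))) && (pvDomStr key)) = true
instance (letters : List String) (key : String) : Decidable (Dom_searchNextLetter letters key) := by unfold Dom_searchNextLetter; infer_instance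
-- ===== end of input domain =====

-- ===== PORT A =====
-- B changes: a pure index-level recursive search returning a (hit, index) tag plus a separate
-- final modular-index mapping, instead of A's imperative loop mutating left/right/ceiling and
-- returning strings from inside the loop (objective: alternative decomposition).
-- Port of A's while loop over the mutable state (left, right, ceiling); terminates on right - left.
-- letters[…] indices are in range throughout the loop under Pre_ (letters ≠ []), so pyGetD is exact here.
def searchNextLetterLoop (letters : List String) (key : String)
    (left right ceiling : Int) : String :=
  if _h : left ≤ right then
    let mid := PySem.Int.floordiv (left + right) 2
    let lm := PySem.List.pyGetD letters mid ""
    if lm = key then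
      if mid + 1 < PySem.List.len letters then PySem.List.pyGetD letters (mid + 1) ""
      else PySem.List.pyGetD letters 0 ""
    else if lm < key then
      searchNextLetterLoop letters key (mid + 1) right ceiling
    else -- letters[mid] > key: the last elif is exhaustive here by trichotomy of the string order
      searchNextLetterLoop letters key left (mid - 1) mid
  else
    PySem.List.pyGetD letters ceiling ""
termination_by (right + 1 - left).toNat
decreasing_by
  · have := PySem.Int.floordiv_two_mid_bounds (lo := left) (hi := right) _h
    omega
  · have := PySem.Int.floordiv_two_mid_bounds (lo := left) (hi := right) _h
    omega

def searchNextLetter (letters : List String) (key : String) : String :=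
  searchNextLetterLoop letters key 0 (PySem.List.len letters - 1) 0

-- ===== PORT B =====
-- port of Source B's helper locate(lo, hi): pure index search, no element is returned from here
def locateB (letters : List String) (key : String) (lo hi : Int) : Bool × Int :=
  if _h : lo > hi then (false, lo)
  else -- mid = lo + (hi - lo) // 2, inlined
    if PySem.List.pyGetD letters (lo + PySem.Int.floordiv (hi - lo) 2) "" < key then
      locateB letters key (lo + PySem.Int.floordiv (hi - lo) 2 + 1) hi
    else if key < PySem.List.pyGetD letters (lo + PySem.Int.floordiv (hi - lo) 2) "" then
      locateB letters key lo (lo + PySem.Int.floordiv (hi - lo) 2 - 1)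
    else (true, lo + PySem.Int.floordiv (hi - lo) 2)
termination_by (hi + 1 - lo).toNat
decreasing_by
  · have h2 := PySem.Int.floordiv_two_mid_bounds (lo := (0:Int)) (hi := hi - lo) (by omega)
    have : PySem.Int.floordiv (hi - lo) 2 = PySem.Int.floordiv (0 + (hi - lo)) 2 := by ring_nf
    omega
  · have h2 := PySem.Int.floordiv_two_mid_bounds (lo := (0:Int)) (hi := hi - lo) (by omega)
    have : PySem.Int.floordiv (hi - lo) 2 = PySem.Int.floordiv (0 + (hi - lo)) 2 := by ring_nf
    omega

def searchNextLetter_alt (letters : List String) (key : String) : String :=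
  let n := PySem.List.len letters
  let r := locateB letters key 0 (n - 1)
  if r.1 then PySem.List.pyGetD letters (PySem.Int.mod (r.2 + 1) n) ""
  else PySem.List.pyGetD letters (PySem.Int.mod r.2 n) ""

-- ===== PRECONDITION & SPEC =====
-- A raises IndexError on the empty list (letters[ceiling] with ceiling = 0); B raises ZeroDivisionError there.
def Pre_searchNextLetter (letters : List String) (key : String) : Prop := letters ≠ []
instance (letters : List String) (key : String) : Decidable (Pre_searchNextLetter letters key) := by unfold Pre_searchNextLetter; infer_instance
def pvWitness_searchNextLetter : List String × String := (["a", "c", "f"], "b")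

def Spec_searchNextLetter (letters : List String) (key : String) (out : String) : Prop := out = searchNextLetter_alt letters key
instance (letters : List String) (key : String) (out : String) : Decidable (Spec_searchNextLetter letters key out) := by unfold Spec_searchNextLetter; infer_instance

-- ===== CLAIM (what is proved, stated in full; the proofs are below) =====
def Claim_equal_searchNextLetter : Prop := ∀ (letters : List String) (key : String), Dom_searchNextLetter letters key → Pre_searchNextLetter letters key → Spec_searchNextLetter letters key (searchNextLetter letters key)

-- ===== LEMMAS AND PROOFS =====

-- B's overflow-safe midpoint coincides with A's midpoint.
theorem midB_eq (lo hi : Int) : lo + PySem.Int.floordiv (hi - lo) 2 = PySem.Int.floordiv (lo + hi) 2 := by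
  rw [PySem.Int.floordiv_eq_ediv_of_pos (by omega), PySem.Int.floordiv_eq_ediv_of_pos (by omega)]
  have : lo + hi = hi - lo + lo * 2 := by ring
  rw [this, Int.add_mul_ediv_right _ _ (by omega : (2:Int) ≠ 0)]
  ring

-- Loop/search correspondence: under the invariant linking A's ceiling to the window,
-- the loop from state (l, r, c) computes exactly B's final mapping of locate(l, r).
theorem loop_eq_locate (letters : List String) (key : String) (l r c : Int)
    (hn : 0 < PySem.List.len letters)
    (hl : 0 ≤ l) (hlr : l ≤ r + 1) (hr : r ≤ PySem.List.len letters - 1)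
    (hc : (c = 0 ∧ r = PySem.List.len letters - 1) ∨
          (c = r + 1 ∧ r ≤ PySem.List.len letters - 2)) :
    searchNextLetterLoop letters key l r c =
      (if (locateB letters key l r).1 then
        PySem.List.pyGetD letters (PySem.Int.mod ((locateB letters key l r).2 + 1) (PySem.List.len letters)) ""
      else
        PySem.List.pyGetD letters (PySem.Int.mod (locateB letters key l r).2 (PySem.List.len letters)) "") := by
  generalize hm : (r + 1 - l).toNat = m
  induction m using Nat.strong_induction_on generalizing l r c with
  | _ m ih =>
  rw [searchNextLetterLoop, locateB]
  by_cases h : l ≤ r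
  · rw [dif_pos h, dif_neg (by omega)]
    rw [midB_eq]
    set mid := PySem.Int.floordiv (l + r) 2 with hmd
    have hmid : l ≤ mid ∧ mid ≤ r := by
      rw [hmd]; exact PySem.Int.floordiv_two_mid_bounds (lo := l) (hi := r) h
    by_cases he : PySem.List.pyGetD letters mid "" = key
    · rw [if_pos he, he]
      simp only [lt_irrefl, if_false, if_true]
      rw [PySem.Int.mod_eq_emod_of_pos hn]
      by_cases hlt : mid + 1 < PySem.List.len letters
      · rw [if_pos hlt, Int.emod_eq_of_lt (by omega) hlt]
      · rw [if_neg hlt]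
        have : mid + 1 = PySem.List.len letters := by omega
        rw [this, Int.emod_self]
    · rw [if_neg he]
      by_cases hl2 : PySem.List.pyGetD letters mid "" < key
      · rw [if_pos hl2, if_pos hl2]
        exact ih (r + 1 - (mid + 1)).toNat (by omega) (mid + 1) r c (by omega) (by omega)
          hr hc rfl
      · have hg : key < PySem.List.pyGetD letters mid "" := by
          rcases lt_trichotomy (PySem.List.pyGetD letters mid "") key with h' | h' | h'
          · exact absurd h' hl2
          · exact absurd h' he
          · exact h'
        rw [if_neg hl2, if_neg hl2, if_pos hg]
        exact ih ((mid - 1) + 1 - l).toNat (by omega) l (mid - 1) mid hl (by omega)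
          (by omega) (Or.inr ⟨by omega, by omega⟩) rfl
  · rw [dif_neg h, dif_pos (by omega)]
    simp only [Bool.false_eq_true, if_false]
    rw [PySem.Int.mod_eq_emod_of_pos hn]
    rcases hc with ⟨hc0, hrn⟩ | ⟨hc1, hr2⟩
    · have hln : l = PySem.List.len letters := by omega
      rw [hln, Int.emod_self, hc0]
    · have hlc : l = c := by omega
      rw [hlc, Int.emod_eq_of_lt (by omega) (by omega)]

-- ===== VERDICT (by name: the statement is the Claim_ definition above) =====
theorem searchNextLetter_spec : Claim_equal_searchNextLetter := by
  intro letters key _hd hpre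
  unfold Spec_searchNextLetter searchNextLetter searchNextLetter_alt
  have hn : 0 < PySem.List.len letters := by
    simp only [PySem.List.len_eq]
    exact_mod_cast List.length_pos_iff.mpr hpre
  exact loop_eq_locate letters key 0 (PySem.List.len letters - 1) 0 hn le_rfl (by omega) le_rfl
    (Or.inl ⟨rfl, rfl⟩)
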